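-- pv_equiv track=rewrite | github.com/cais-psu/CAIS_Lab_Web | _cite/plugins/google-scholar.py | _prefer_original
-- ===== SOURCE A (Python) =====
-- from typing import Any, Dict, List, Optional, Tuple
--
-- def _non_scholar(url: Optional[str]) -> bool:
--     return bool(url) and ("scholar.google." not in url)
--
-- def _prefer_original(links: List[str]) -> Optional[str]:
--     """Select best 'original' URL: doi.org > arxiv.org > publisher (non-scholar) > else None."""
--     if not links:
--         return None
--     # dedupe & keep order
--     seen, ordered = set(), []
--     for u in links:
--         if u and u not in seen:
--             seen.add(u)
--             ordered.append(u)
--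
--     # 1) doi.org
--     for u in ordered:
--         if "doi.org/" in u:
--             return u
--     # 2) arxiv
--     for u in ordered:
--         if "arxiv.org/" in u:
--             return u
--     # 3) any non-scholar http
--     for u in ordered:
--         if u.startswith("http") and _non_scholar(u):
--             return u
--     return None
-- ===== SOURCE B (Python) =====
-- from typing import List, Optional
--
-- def _prefer_original(links: List[str]) -> Optional[str]:
--     """Single pass: rank each url (doi=0, arxiv=1, non-scholar http=2); keep the first url of the best rank seen."""
--     best_url, best_rank = None, 3
--     for u in links:
--         if not u:
--             continue
--         if "doi.org/" in u:
--             r = 0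
--         elif "arxiv.org/" in u:
--             r = 1
--         elif u.startswith("http") and "scholar.google." not in u:
--             r = 2
--         else:
--             continue
--         if r < best_rank:
--             best_url, best_rank = u, r
--     return best_url
-- ===== Notes on version B (the rewrite author's own statement) =====
-- stated objective: alternative
-- what changed: Replaces the dedup pass plus three sequential scans with a single pass that ranks each URL (doi=0, arxiv=1, non-scholar http=2) and keeps the first URL of the best rank seen.
import Mathlib
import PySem

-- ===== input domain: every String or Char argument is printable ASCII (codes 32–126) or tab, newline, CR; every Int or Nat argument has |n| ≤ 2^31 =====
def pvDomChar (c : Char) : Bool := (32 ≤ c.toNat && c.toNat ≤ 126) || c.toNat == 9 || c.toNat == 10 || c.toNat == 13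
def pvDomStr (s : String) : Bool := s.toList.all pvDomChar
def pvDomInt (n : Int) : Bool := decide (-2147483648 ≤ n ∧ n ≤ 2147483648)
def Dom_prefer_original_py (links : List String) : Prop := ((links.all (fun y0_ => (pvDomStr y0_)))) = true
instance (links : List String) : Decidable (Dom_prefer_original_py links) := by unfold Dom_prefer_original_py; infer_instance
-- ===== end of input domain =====

-- B replaces A's dedup pass and three sequential scans by one pass that ranks each URL and keeps the first best-ranked one (objective: alternative single-pass decomposition).

-- ===== PORT A =====
-- _non_scholar(url) = bool(url) and "scholar.google." not in url
def pvNonScholar (url : String) : Bool := !(url == "") && !(PySem.Str.isIn "scholar.google." url)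

-- the dedup loop: for u in links: if u and u not in seen: seen.add(u); ordered.append(u)
def pvDedupStep (st : PySem.Set String × List String) (u : String) : PySem.Set String × List String :=
  if !(u == "") && !(PySem.Set.contains st.1 u) then (PySem.Set.add st.1 u, st.2 ++ [u]) else st

-- for u in ordered: if "doi.org/" in u: return u
def pvLoopDoi : List String → Option String
  | [] => none
  | u :: rest => if PySem.Str.isIn "doi.org/" u then some u else pvLoopDoi rest

-- for u in ordered: if "arxiv.org/" in u: return u
def pvLoopArxiv : List String → Option String
  | [] => none
  | u :: rest => if PySem.Str.isIn "arxiv.org/" u then some u else pvLoopArxiv rest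

-- for u in ordered: if u.startswith("http") and _non_scholar(u): return u
def pvLoopHttp : List String → Option String
  | [] => none
  | u :: rest => if PySem.Str.startswith u "http" && pvNonScholar u then some u else pvLoopHttp rest

def prefer_original_py (links : List String) : Option String :=
  if links == [] then none
  else
    let ordered := (links.foldl pvDedupStep (PySem.Set.empty, [])).2
    match pvLoopDoi ordered with
    | some u => some u
    | none =>
      match pvLoopArxiv ordered with
      | some u => some u
      | none => pvLoopHttp ordered

-- ===== PORT B =====
-- the rank chain of B's loop body (none = continue)
def pvRank (u : String) : Option Nat :=
  if PySem.Str.isIn "doi.org/" u then some 0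
  else if PySem.Str.isIn "arxiv.org/" u then some 1
  else if PySem.Str.startswith u "http" && !(PySem.Str.isIn "scholar.google." u) then some 2
  else none

-- one iteration of B's single loop over (best_url, best_rank)
def pvBStep (st : Option String × Nat) (u : String) : Option String × Nat :=
  if u == "" then st
  else
    match pvRank u with
    | none => st
    | some r => if r < st.2 then (some u, r) else st

def prefer_original_py_alt (links : List String) : Option String :=
  (links.foldl pvBStep (none, 3)).1

-- ===== PRECONDITION & SPEC =====
def Spec_prefer_original_py (links : List String) (out : Option String) : Prop := out = prefer_original_py_alt links
instance (links : List String) (out : Option String) : Decidable (Spec_prefer_original_py links out) := by unfold Spec_prefer_original_py; infer_instance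

-- ===== CLAIM (what is proved, stated in full; the proofs are below) =====
def Claim_equal_prefer_original_py : Prop := ∀ (links : List String), Dom_prefer_original_py links → Spec_prefer_original_py links (prefer_original_py links)

-- ===== LEMMAS AND PROOFS =====

-- predicate abbreviations used only by the proofs
def pd (u : String) : Bool := PySem.Str.isIn "doi.org/" u
def pa (u : String) : Bool := PySem.Str.isIn "arxiv.org/" u
def ps (u : String) : Bool := PySem.Str.isIn "scholar.google." u
def ph (u : String) : Bool := PySem.Str.startswith u "http" && !(ps u)
-- exact qualifying predicates of B's ranks
def q0 (u : String) : Bool := !(u == "") && pd u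
def q1 (u : String) : Bool := !(u == "") && (!(pd u) && pa u)
def q2 (u : String) : Bool := !(u == "") && (!(pd u) && (!(pa u) && ph u))
-- A's third-scan predicate
def pA2 (u : String) : Bool := PySem.Str.startswith u "http" && pvNonScholar u

lemma loopDoi_eq (xs : List String) : pvLoopDoi xs = xs.find? pd := by
  induction xs with
  | nil => rfl
  | cons u rest ih => simp [pvLoopDoi, List.find?, pd]; split <;> simp_all

lemma loopArxiv_eq (xs : List String) : pvLoopArxiv xs = xs.find? pa := by
  induction xs with
  | nil => rfl
  | cons u rest ih => simp [pvLoopArxiv, List.find?, pa]; split <;> simp_all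

lemma loopHttp_eq (xs : List String) : pvLoopHttp xs = xs.find? pA2 := by
  induction xs with
  | nil => rfl
  | cons u rest ih =>
    simp only [pvLoopHttp]
    rw [show (PySem.Str.startswith u "http" && pvNonScholar u) = pA2 u from rfl]
    cases h : pA2 u <;> simp [List.find?, h, ih]

lemma contains_add (s : PySem.Set String) (u w : String) :
    PySem.Set.contains (PySem.Set.add s u) w = (PySem.Set.contains s w || w == u) := by
  simp [PySem.Set.add, PySem.Set.contains]
  split <;> rename_i h
  · by_cases hw : w = u <;> simp_all
  · by_cases hw : w = u <;> simp_all

-- the dedup pass does not change any first match of a predicate that fails on ""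
lemma find?_dedup (p : String → Bool) (hp : p "" = false) :
    ∀ (xs : List String) (s : PySem.Set String) (acc : List String),
      (∀ u, PySem.Set.contains s u = true ↔ u ∈ acc) →
      ((xs.foldl pvDedupStep (s, acc)).2.find? p) = (acc.find? p).or (xs.find? p) := by
  intro xs
  induction xs with
  | nil => intro s acc _; simp
  | cons u rest ih =>
    intro s acc hinv
    by_cases hu : u = ""
    · subst hu
      have hstep : pvDedupStep (s, acc) "" = (s, acc) := by simp [pvDedupStep]
      rw [List.foldl_cons, hstep, ih s acc hinv]
      simp [List.find?, hp]
    · by_cases hs : PySem.Set.contains s u = true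
      · have hmem : u ∈ acc := (hinv u).mp hs
        have hmem' : u ∈ s := by simpa [PySem.Set.contains] using hs
        have hstep : pvDedupStep (s, acc) u = (s, acc) := by simp [pvDedupStep, hmem']
        rw [List.foldl_cons, hstep, ih s acc hinv]
        by_cases hpu : p u = true
        · have : (acc.find? p).isSome := List.find?_isSome.mpr ⟨u, hmem, hpu⟩
          obtain ⟨v, hv⟩ := Option.isSome_iff_exists.mp this
          simp [List.find?, hv, hpu]
        · simp [List.find?, Bool.eq_false_iff.mpr hpu]
      · have hnot : u ∉ s := by simpa [PySem.Set.contains] using hs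
        have hstep : pvDedupStep (s, acc) u = (PySem.Set.add s u, acc ++ [u]) := by
          simp [pvDedupStep, hu, hnot]
        rw [List.foldl_cons, hstep, ih (PySem.Set.add s u) (acc ++ [u]) ?_]
        · rw [List.find?_append]
          cases hpu : p u <;> simp [List.find?, hpu]
        · intro w
          rw [contains_add]
          constructor
          · intro h
            rcases Bool.or_eq_true_iff.mp h with h | h
            · exact List.mem_append.mpr (Or.inl ((hinv w).mp h))
            · simp [eq_of_beq h]
          · intro h
            rcases List.mem_append.mp h with h | h
            · exact Bool.or_eq_true_iff.mpr (Or.inl ((hinv w).mpr h))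
            · simp at h; simp [h]

-- B-side: behaviour of the fold from each reachable best_rank
lemma rank_ge_one {u : String} (hd : pd u = false) {r : Nat} (h : pvRank u = some r) : 1 ≤ r := by
  unfold pvRank at h
  simp [pd] at hd
  simp [hd] at h
  split at h <;> simp_all <;> omega

lemma rank_ge_two {u : String} (hd : pd u = false) (ha : pa u = false) {r : Nat}
    (h : pvRank u = some r) : 2 ≤ r := by
  unfold pvRank at h
  simp [pd] at hd; simp [pa] at ha
  simp [hd, ha] at h
  rcases h with ⟨-, hr⟩
  omega

lemma rank_doi {u : String} (hd : pd u = true) : pvRank u = some 0 := by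
  simp [pd] at hd; simp [pvRank, hd]

lemma rank_arxiv {u : String} (hd : pd u = false) (ha : pa u = true) : pvRank u = some 1 := by
  simp [pd] at hd; simp [pa] at ha; simp [pvRank, hd, ha]

lemma rank_http {u : String} (hd : pd u = false) (ha : pa u = false) (hh : ph u = true) :
    pvRank u = some 2 := by
  simp [pd] at hd; simp [pa] at ha; simp [ph, ps] at hh
  simp [pvRank, hd, ha, hh]

lemma rank_none {u : String} (hd : pd u = false) (ha : pa u = false) (hh : ph u = false) :
    pvRank u = none := by
  simp [pd] at hd; simp [pa] at ha; simp [ph, ps] at hh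
  simp [pvRank, hd, ha]
  intro h
  rcases hh h with h'
  simp [h']

lemma foldB_zero (xs : List String) (b : Option String) :
    xs.foldl pvBStep (b, 0) = (b, 0) := by
  induction xs with
  | nil => rfl
  | cons u rest ih =>
    have hstep : pvBStep (b, 0) u = (b, 0) := by
      unfold pvBStep
      split
      · rfl
      · cases h : pvRank u with
        | none => rfl
        | some r => simp
    simp [List.foldl_cons, hstep, ih]

lemma foldB_one (xs : List String) (b : Option String) :
    (xs.foldl pvBStep (b, 1)).1 = (xs.find? q0).or b := by
  induction xs generalizing b with
  | nil => simp
  | cons u rest ih =>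
    by_cases hu : u = ""
    · subst hu
      simp [List.foldl_cons, pvBStep, List.find?, q0, ih]
    · by_cases hd : pd u = true
      · have hstep : pvBStep (b, 1) u = (some u, 0) := by
          simp [pvBStep, hu, rank_doi hd]
        have hq0 : q0 u = true := by simp [q0, hu, hd]
        simp [List.foldl_cons, hstep, foldB_zero, List.find?, hq0]
      · have hstep : pvBStep (b, 1) u = (b, 1) := by
          unfold pvBStep
          simp [hu]
          cases h : pvRank u with
          | none => rfl
          | some r =>
            have := rank_ge_one (Bool.eq_false_iff.mpr hd) h
            simp; omega
        have hq : q0 u = false := by simp [q0, hd]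
        simp [List.foldl_cons, hstep, List.find?, hq, ih]

lemma foldB_two (xs : List String) (b : Option String) :
    (xs.foldl pvBStep (b, 2)).1 = ((xs.find? q0).or (xs.find? q1)).or b := by
  induction xs generalizing b with
  | nil => simp
  | cons u rest ih =>
    by_cases hu : u = ""
    · subst hu
      simp [List.foldl_cons, pvBStep, List.find?, q0, q1, ih]
    · by_cases hd : pd u = true
      · have hstep : pvBStep (b, 2) u = (some u, 0) := by
          simp [pvBStep, hu, rank_doi hd]
        have hq0 : q0 u = true := by simp [q0, hu, hd]
        simp [List.foldl_cons, hstep, foldB_zero, List.find?, hq0]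
      · by_cases ha : pa u = true
        · have hstep : pvBStep (b, 2) u = (some u, 1) := by
            simp [pvBStep, hu, rank_arxiv (Bool.eq_false_iff.mpr hd) ha]
          have hq0 : q0 u = false := by simp [q0, hd]
          have hq1 : q1 u = true := by simp [q1, hu, hd, ha]
          simp [List.foldl_cons, hstep, foldB_one, List.find?, hq0, hq1]
        · have hstep : pvBStep (b, 2) u = (b, 2) := by
            unfold pvBStep
            simp [hu]
            cases h : pvRank u with
            | none => rfl
            | some r =>
              have := rank_ge_two (Bool.eq_false_iff.mpr hd) (Bool.eq_false_iff.mpr ha) h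
              simp; omega
          have hq0 : q0 u = false := by simp [q0, hd]
          have hq1 : q1 u = false := by simp [q1, hd, ha]
          simp [List.foldl_cons, hstep, List.find?, hq0, hq1, ih]

lemma foldB_three (xs : List String) (b : Option String) :
    (xs.foldl pvBStep (b, 3)).1 = (((xs.find? q0).or (xs.find? q1)).or (xs.find? q2)).or b := by
  induction xs generalizing b with
  | nil => simp
  | cons u rest ih =>
    by_cases hu : u = ""
    · subst hu
      simp [List.foldl_cons, pvBStep, List.find?, q0, q1, q2, ih]
    · by_cases hd : pd u = true
      · have hstep : pvBStep (b, 3) u = (some u, 0) := by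
          simp [pvBStep, hu, rank_doi hd]
        have hq0 : q0 u = true := by simp [q0, hu, hd]
        simp [List.foldl_cons, hstep, foldB_zero, List.find?, hq0]
      · by_cases ha : pa u = true
        · have hstep : pvBStep (b, 3) u = (some u, 1) := by
            simp [pvBStep, hu, rank_arxiv (Bool.eq_false_iff.mpr hd) ha]
          have hq0 : q0 u = false := by simp [q0, hd]
          have hq1 : q1 u = true := by simp [q1, hu, hd, ha]
          simp [List.foldl_cons, hstep, foldB_one, List.find?, hq0, hq1]
        · by_cases hh : ph u = true
          · have hstep : pvBStep (b, 3) u = (some u, 2) := by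
              simp [pvBStep, hu,
                rank_http (Bool.eq_false_iff.mpr hd) (Bool.eq_false_iff.mpr ha) hh]
            have hq0 : q0 u = false := by simp [q0, hd]
            have hq1 : q1 u = false := by simp [q1, hd, ha]
            have hq2 : q2 u = true := by simp [q2, hu, hd, ha, hh]
            simp [List.foldl_cons, hstep, foldB_two, List.find?, hq0, hq1, hq2]
          · have hstep : pvBStep (b, 3) u = (b, 3) := by
              simp [pvBStep, hu,
                rank_none (Bool.eq_false_iff.mpr hd) (Bool.eq_false_iff.mpr ha)
                  (Bool.eq_false_iff.mpr hh)]
            have hq0 : q0 u = false := by simp [q0, hd]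
            have hq1 : q1 u = false := by simp [q1, hd, ha]
            have hq2 : q2 u = false := by simp [q2, hd, ha, hh]
            simp [List.foldl_cons, hstep, List.find?, hq0, hq1, hq2, ih]

-- bridging the qualified predicates to the plain ones
lemma q0_eq_pd : q0 = pd := by
  funext u
  by_cases hu : u = ""
  · subst hu; decide
  · simp [q0, hu]

lemma find?_q1_eq (xs : List String) (h : xs.find? pd = none) :
    xs.find? q1 = xs.find? pa := by
  induction xs with
  | nil => rfl
  | cons u rest ih =>
    have hall := List.find?_eq_none.mp h
    have hd : pd u = false := Bool.eq_false_iff.mpr (hall u (List.mem_cons_self))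
    have hrest : rest.find? pd = none :=
      List.find?_eq_none.mpr (fun x hx => hall x (List.mem_cons_of_mem _ hx))
    have hq : q1 u = pa u := by
      by_cases hu : u = ""
      · subst hu; decide
      · simp [q1, hu, hd]
    simp only [List.find?, hq, ih hrest]

lemma find?_q2_eq (xs : List String) (h0 : xs.find? pd = none) (h1 : xs.find? pa = none) :
    xs.find? q2 = xs.find? pA2 := by
  induction xs with
  | nil => rfl
  | cons u rest ih =>
    have hall0 := List.find?_eq_none.mp h0
    have hall1 := List.find?_eq_none.mp h1
    have hd : pd u = false := Bool.eq_false_iff.mpr (hall0 u (List.mem_cons_self))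
    have ha : pa u = false := Bool.eq_false_iff.mpr (hall1 u (List.mem_cons_self))
    have hrest0 : rest.find? pd = none :=
      List.find?_eq_none.mpr (fun x hx => hall0 x (List.mem_cons_of_mem _ hx))
    have hrest1 : rest.find? pa = none :=
      List.find?_eq_none.mpr (fun x hx => hall1 x (List.mem_cons_of_mem _ hx))
    have hq : q2 u = pA2 u := by
      by_cases hu : u = ""
      · subst hu; decide
      · have hu' : (u == "") = false := by simp [hu]
        simp [q2, pA2, pvNonScholar, ph, ps, hu', hd, ha]
    simp only [List.find?, hq, ih hrest0 hrest1]

-- A's match chain as an Option.or chain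
lemma matchChain (xs : List String) :
    (match pvLoopDoi xs with
     | some u => some u
     | none =>
       match pvLoopArxiv xs with
       | some u => some u
       | none => pvLoopHttp xs) =
    (xs.find? pd).or ((xs.find? pa).or (xs.find? pA2)) := by
  rw [loopDoi_eq, loopArxiv_eq, loopHttp_eq]
  cases xs.find? pd <;> cases xs.find? pa <;> simp

-- ===== VERDICT (by name: the statement is the Claim_ definition above) =====
theorem prefer_original_py_spec : Claim_equal_prefer_original_py := by
  intro links _
  unfold Spec_prefer_original_py prefer_original_py prefer_original_py_alt
  rw [foldB_three, q0_eq_pd]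
  by_cases hnil : links = []
  · subst hnil; simp
  · simp only [beq_iff_eq, hnil]
    rw [matchChain]
    have hdedup : ∀ (p : String → Bool), p "" = false →
        ((links.foldl pvDedupStep (PySem.Set.empty, [])).2.find? p) = links.find? p := by
      intro p hp
      rw [find?_dedup p hp links PySem.Set.empty [] (by
        intro u; simp [PySem.Set.empty, PySem.Set.contains])]
      simp
    rw [hdedup pd (by decide), hdedup pa (by decide), hdedup pA2 (by decide)]
    cases h0 : links.find? pd with
    | some v => simp
    | none =>
      simp only [Option.none_or]
      cases h1 : links.find? pa with
      | some v => rw [find?_q1_eq links h0]; simp [h1]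
      | none =>
        rw [find?_q1_eq links h0, h1]
        simp only [Option.none_or, Option.or_none]
        rw [find?_q2_eq links h0 h1]
        simp
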